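-- pv_equiv track=rewrite | github.com/CribberSix/pygame-markdown | pygamemarkdown/__init__.py | interpret_text_blocks
-- ===== SOURCE A (Python) =====
-- from typing import List
--
-- def interpret_text_blocks(text_cut) -> List:
--     text_blocks = []
--     for line in text_cut:
--         if line[:2] == '# ':  # h1
--             text_blocks.append({'chars': line[2:].lstrip(), 'type': 'h1'})
--         elif line[:3] == '## ':
--             text_blocks.append({'chars': line[3:].lstrip(), 'type': 'h2'})
--         elif line[:4] == '### ':
--             text_blocks.append({'chars': line[4:].lstrip(), 'type': 'h3'})
--         else:
--             text_blocks.append({'chars': line, 'type': 'text'})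
--     return text_blocks
-- ===== SOURCE B (Python) =====
-- def _classify(line):
--     k = len(line) - len(line.lstrip('#'))
--     if 1 <= k <= 3 and line[k:k+1] == ' ':
--         return {'chars': line[k+1:].lstrip(), 'type': 'h' + str(k)}
--     return {'chars': line, 'type': 'text'}
--
--
-- def interpret_text_blocks(text_cut):
--     return [_classify(line) for line in text_cut]
-- ===== Notes on version B (the rewrite author's own statement) =====
-- stated objective: idiomatic
-- what changed: B classifies each line by counting its leading '#' run once and checking the following character, building the list with a comprehension over one helper, instead of A's three fixed-length prefix comparisons in an append loop.
import Mathlib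
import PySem

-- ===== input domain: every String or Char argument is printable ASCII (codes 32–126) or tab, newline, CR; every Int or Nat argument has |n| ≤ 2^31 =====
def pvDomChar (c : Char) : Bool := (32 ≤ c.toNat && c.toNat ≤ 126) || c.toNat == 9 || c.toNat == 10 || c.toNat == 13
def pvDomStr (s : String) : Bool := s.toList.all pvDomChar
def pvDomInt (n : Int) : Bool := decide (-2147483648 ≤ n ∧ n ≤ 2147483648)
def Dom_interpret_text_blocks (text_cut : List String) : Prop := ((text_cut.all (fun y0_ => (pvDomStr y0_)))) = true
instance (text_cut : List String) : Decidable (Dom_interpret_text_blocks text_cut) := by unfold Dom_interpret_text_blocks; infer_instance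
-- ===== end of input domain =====

-- B replaces A's three fixed-length prefix comparisons by counting the leading '#' run once; same output, idiomatic restructuring.

-- ===== PORT A =====
def interpret_text_blocks (text_cut : List String) : List (List (String × String)) :=
  text_cut.foldl (fun text_blocks line =>
    if PySem.Str.slice line none (some 2) = "# " then
      text_blocks ++ [[("chars", PySem.Str.lstrip (PySem.Str.slice line (some 2) none)), ("type", "h1")]]
    else if PySem.Str.slice line none (some 3) = "## " then
      text_blocks ++ [[("chars", PySem.Str.lstrip (PySem.Str.slice line (some 3) none)), ("type", "h2")]]
    else if PySem.Str.slice line none (some 4) = "### " then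
      text_blocks ++ [[("chars", PySem.Str.lstrip (PySem.Str.slice line (some 4) none)), ("type", "h3")]]
    else
      text_blocks ++ [[("chars", line), ("type", "text")]]) []

-- ===== PORT B =====
-- line.lstrip('#') ported by hand as dropWhile (· == '#') (exact: lstrip with a char set drops exactly the leading run of those chars)
def pvClassify (line : String) : List (String × String) :=
  let cs := line.toList
  let k := cs.length - (cs.dropWhile (· == '#')).length
  if 1 ≤ k ∧ k ≤ 3 ∧ PySem.List.slice cs (some (k : Int)) (some ((k : Int) + 1)) = [' '] then
    [("chars", PySem.Str.lstrip (String.ofList (cs.drop (k + 1)))), ("type", "h" ++ PySem.Int.toStr (k : Int))]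
  else
    [("chars", line), ("type", "text")]

def interpret_text_blocks_alt (text_cut : List String) : List (List (String × String)) :=
  text_cut.map pvClassify

-- ===== PRECONDITION & SPEC =====
def Spec_interpret_text_blocks (text_cut : List String) (out : List (List (String × String))) : Prop := out = interpret_text_blocks_alt text_cut
instance (text_cut : List String) (out : List (List (String × String))) : Decidable (Spec_interpret_text_blocks text_cut out) := by unfold Spec_interpret_text_blocks; infer_instance

-- ===== CLAIM (what is proved, stated in full; the proofs are below) =====
def Claim_equal_interpret_text_blocks : Prop := ∀ (text_cut : List String), Dom_interpret_text_blocks text_cut → Spec_interpret_text_blocks text_cut (interpret_text_blocks text_cut)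

-- ===== LEMMAS AND PROOFS =====

-- A's per-line body, named for the proof
def pvClassifyA (line : String) : List (String × String) :=
  if PySem.Str.slice line none (some 2) = "# " then
    [("chars", PySem.Str.lstrip (PySem.Str.slice line (some 2) none)), ("type", "h1")]
  else if PySem.Str.slice line none (some 3) = "## " then
    [("chars", PySem.Str.lstrip (PySem.Str.slice line (some 3) none)), ("type", "h2")]
  else if PySem.Str.slice line none (some 4) = "### " then
    [("chars", PySem.Str.lstrip (PySem.Str.slice line (some 4) none)), ("type", "h3")]
  else
    [("chars", line), ("type", "text")]

theorem pvA_foldl (l : List String) (acc : List (List (String × String))) :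
    l.foldl (fun text_blocks line =>
      if PySem.Str.slice line none (some 2) = "# " then
        text_blocks ++ [[("chars", PySem.Str.lstrip (PySem.Str.slice line (some 2) none)), ("type", "h1")]]
      else if PySem.Str.slice line none (some 3) = "## " then
        text_blocks ++ [[("chars", PySem.Str.lstrip (PySem.Str.slice line (some 3) none)), ("type", "h2")]]
      else if PySem.Str.slice line none (some 4) = "### " then
        text_blocks ++ [[("chars", PySem.Str.lstrip (PySem.Str.slice line (some 4) none)), ("type", "h3")]]
      else
        text_blocks ++ [[("chars", line), ("type", "text")]]) acc
    = acc ++ l.map pvClassifyA := by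
  induction l generalizing acc with
  | nil => simp
  | cons x xs ih =>
    simp only [List.foldl_cons, List.map_cons, pvClassifyA]
    split_ifs <;> simp [ih]

-- list-level core of the per-line equality
theorem pvKey (line : String) (cs : List Char) :
    (if cs.take 2 = ['#', ' '] then
      [("chars", PySem.Str.lstrip (String.ofList (cs.drop 2))), ("type", ("h1" : String))]
    else if cs.take 3 = ['#', '#', ' '] then
      [("chars", PySem.Str.lstrip (String.ofList (cs.drop 3))), ("type", ("h2" : String))]
    else if cs.take 4 = ['#', '#', '#', ' '] then
      [("chars", PySem.Str.lstrip (String.ofList (cs.drop 4))), ("type", ("h3" : String))]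
    else [("chars", line), ("type", ("text" : String))])
    = (let k := cs.length - (cs.dropWhile (· == '#')).length
      if 1 ≤ k ∧ k ≤ 3 ∧ (cs.drop k).take 1 = [' '] then
        [("chars", PySem.Str.lstrip (String.ofList (cs.drop (k + 1)))), ("type", "h" ++ PySem.Int.toStr (k : Int))]
      else [("chars", line), ("type", ("text" : String))]) := by
  have hk : cs.length - (cs.dropWhile (· == '#')).length = (cs.takeWhile (· == '#')).length := by
    have h1 : (cs.takeWhile (· == '#')).length + (cs.dropWhile (· == '#')).length = cs.length := by
      rw [← List.length_append, List.takeWhile_append_dropWhile]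
    omega
  simp only [hk]
  rcases cs with _ | ⟨a, cs⟩
  · simp
  · by_cases ha : a = '#'
    · subst ha
      rcases cs with _ | ⟨b, cs⟩
      · simp [List.takeWhile]
      · by_cases hb : b = '#'
        · subst hb
          rcases cs with _ | ⟨c, cs⟩
          · simp [List.takeWhile]
          · by_cases hc : c = '#'
            · subst hc
              rcases cs with _ | ⟨d, cs⟩
              · simp [List.takeWhile]
              · by_cases hd : d = '#'
                · subst hd
                  simp only [List.takeWhile_cons]
                  simp [List.take, List.drop]
                · have hd' : (d == '#') = false := by simp [hd]
                  by_cases hd2 : d = ' '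
                  · subst hd2
                    simp [List.takeWhile, hd']
                    decide
                  · simp [List.takeWhile, hd', hd2]
            · have hc' : (c == '#') = false := by simp [hc]
              by_cases hc2 : c = ' '
              · subst hc2
                simp [List.takeWhile, hc']
                decide
              · simp [List.takeWhile, hc', hc2, hc]
        · have hb' : (b == '#') = false := by simp [hb]
          by_cases hb2 : b = ' '
          · subst hb2
            simp [List.takeWhile, hb']
            decide
          · simp [List.takeWhile, hb', hb2, hb]
    · have ha' : (a == '#') = false := by simp [ha]
      simp [List.takeWhile, ha', ha]

theorem pvClassify_eq (line : String) : pvClassifyA line = pvClassify line := by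
  have e2 : (PySem.Str.slice line none (some 2) = "# ") ↔ line.toList.take 2 = ['#', ' '] := by
    rw [String.ext_iff, PySem.Str.toList_slice, PySem.Chars.slice_eq_listSlice, PySem.List.slice_to,
       show "# ".toList = ['#', ' '] from rfl]
    · exact Iff.rfl
    · norm_num
  have e3 : (PySem.Str.slice line none (some 3) = "## ") ↔ line.toList.take 3 = ['#', '#', ' '] := by
    rw [String.ext_iff, PySem.Str.toList_slice, PySem.Chars.slice_eq_listSlice, PySem.List.slice_to,
       show "## ".toList = ['#', '#', ' '] from rfl]
    · exact Iff.rfl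
    · norm_num
  have e4 : (PySem.Str.slice line none (some 4) = "### ") ↔ line.toList.take 4 = ['#', '#', '#', ' '] := by
    rw [String.ext_iff, PySem.Str.toList_slice, PySem.Chars.slice_eq_listSlice, PySem.List.slice_to,
       show "### ".toList = ['#', '#', '#', ' '] from rfl]
    · exact Iff.rfl
    · norm_num
  have s2 : PySem.Str.slice line (some 2) none = String.ofList (line.toList.drop 2) := by
    rw [String.ext_iff, PySem.Str.toList_slice, PySem.Chars.slice_eq_listSlice]
    rw [PySem.List.slice_from _ _] <;> simp
  have s3 : PySem.Str.slice line (some 3) none = String.ofList (line.toList.drop 3) := by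
    rw [String.ext_iff, PySem.Str.toList_slice, PySem.Chars.slice_eq_listSlice]
    rw [PySem.List.slice_from _ _] <;> simp
  have s4 : PySem.Str.slice line (some 4) none = String.ofList (line.toList.drop 4) := by
    rw [String.ext_iff, PySem.Str.toList_slice, PySem.Chars.slice_eq_listSlice]
    rw [PySem.List.slice_from _ _] <;> simp
  have hsl : ∀ (xs : List Char) (k : Nat),
      PySem.List.slice xs (some (k : Int)) (some ((k : Int) + 1)) = (xs.drop k).take 1 := by
    intro xs k
    have := PySem.List.slice_natCast_add (xs := xs) (j := k) (n := 1)
    simpa using this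
  unfold pvClassifyA pvClassify
  simp only [s2, s3, s4, hsl]
  rw [if_congr e2 rfl rfl, if_congr e3 rfl rfl, if_congr e4 rfl rfl]
  exact pvKey line line.toList

theorem interpret_text_blocks_spec : Claim_equal_interpret_text_blocks := by
  intro text_cut _
  unfold Spec_interpret_text_blocks interpret_text_blocks interpret_text_blocks_alt
  rw [pvA_foldl]
  simp [pvClassify_eq]
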